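-- pv_equiv track=rewrite | github.com/soletty/funzies | gcc/web/scripts/discover-families-v4-targeted.py | is_junk
-- ===== SOURCE A (Python) =====
-- def is_junk(name):
--     lower = name.lower()
--     junk_words = [
--         'stadium', 'airport', 'hotel', 'tower', 'mall', 'hospital',
--         'university', 'school', 'mosque', 'street', 'road', 'highway',
--         'district', 'province', 'region', 'city', 'village', 'island',
--         'company', 'corporation', 'inc.', 'ltd.',
--         'ministry', 'government', 'authority',
--     ]
--     for w in junk_words:
--         if w in lower:
--             return True
--     if len(name) < 3 or len(name) > 60:
--         return True
--     if name.count(' ') > 5: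
--         return True
--     return False
-- ===== SOURCE B (Python) =====
-- JUNK_WORDS = [
--     'stadium', 'airport', 'hotel', 'tower', 'mall', 'hospital',
--     'university', 'school', 'mosque', 'street', 'road', 'highway',
--     'district', 'province', 'region', 'city', 'village', 'island',
--     'company', 'corporation', 'inc.', 'ltd.',
--     'ministry', 'government', 'authority',
-- ]
--
--
-- def is_junk(name):
--     # Length/space guards, then ONE left-to-right pass over the lowered name
--     # simulating the naive NFA of the junk-word patterns: `active` holds the
--     # suffixes of junk words whose earlier characters have been matched; at
--     # every character each pattern is also (re)started.  A word occurs as a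
--     # substring iff some suffix is fully consumed.
--     if len(name) < 3 or len(name) > 60 or name.count(' ') > 5:
--         return True
--     active = []
--     for ch in name.lower():
--         advanced = [s[1:] for s in active + JUNK_WORDS if s[0] == ch]
--         if '' in advanced:
--             return True
--         active = advanced
--     return False
-- ===== Notes on version B (the rewrite author's own statement) =====
-- stated objective: alternative
-- what changed: B applies the length/space guards first (so oversized names are rejected before any text scan) and replaces A's per-word substring loop by a single left-to-right pass over the lowered name that maintains the set of junk-word suffixes still being matched (a naive NFA simulation, restarting every pattern at each character), reporting a match when a suffix is fully consumed.
import Mathlib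
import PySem

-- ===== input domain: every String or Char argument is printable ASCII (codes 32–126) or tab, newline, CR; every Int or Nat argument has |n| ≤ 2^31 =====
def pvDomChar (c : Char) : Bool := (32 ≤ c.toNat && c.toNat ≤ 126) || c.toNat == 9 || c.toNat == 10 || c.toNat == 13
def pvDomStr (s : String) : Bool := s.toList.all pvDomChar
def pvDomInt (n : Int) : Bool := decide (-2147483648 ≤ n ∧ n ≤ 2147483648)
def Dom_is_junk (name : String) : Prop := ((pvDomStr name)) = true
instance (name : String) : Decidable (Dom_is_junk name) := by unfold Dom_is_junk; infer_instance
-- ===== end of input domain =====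

-- B checks the length/space guards first and then makes one left-to-right pass over
-- the lowered name, maintaining the set of junk-word suffixes still being matched
-- (a naive NFA simulation), instead of A's per-word substring loop; objective:
-- alternative, same result.

-- ===== PORT A =====
def pvJunkWordsA : List String :=
  ["stadium", "airport", "hotel", "tower", "mall", "hospital",
   "university", "school", "mosque", "street", "road", "highway",
   "district", "province", "region", "city", "village", "island",
   "company", "corporation", "inc.", "ltd.",
   "ministry", "government", "authority"]

-- 'for w in junk_words: if w in lower: return True'
def pvAWordLoop (lower : String) : List String → Bool
  | [] => false
  | w :: ws => if PySem.Str.isIn w lower then true else pvAWordLoop lower ws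

def is_junk (name : String) : Bool :=
  let lower := PySem.Str.lower name
  if pvAWordLoop lower pvJunkWordsA then true
  else if PySem.Str.len name < 3 || 60 < PySem.Str.len name then true
  else if 5 < PySem.Str.count name " " then true
  else false

-- ===== PORT B =====
def pvJunkWordsB : List (List Char) :=
  (["stadium", "airport", "hotel", "tower", "mall", "hospital",
    "university", "school", "mosque", "street", "road", "highway",
    "district", "province", "region", "city", "village", "island",
    "company", "corporation", "inc.", "ltd.",
    "ministry", "government", "authority"]).map String.toList

-- 'advanced = [s[1:] for s in active + JUNK_WORDS if s[0] == ch]'.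
-- s[0] == ch is ported as s.head? == some c: exact, because every s in
-- active + JUNK_WORDS is nonempty in Source B (so s[0] never raises).
def pvAdvance (c : Char) (ss : List (List Char)) : List (List Char) :=
  (ss.filter (fun s => s.head? == some c)).map (fun s => s.drop 1)

-- the 'for ch in name.lower():' loop of Source B, with accumulator `active`
def pvScan (words : List (List Char)) (active : List (List Char)) : List Char → Bool
  | [] => false
  | c :: rest =>
      let adv := pvAdvance c (active ++ words)
      if adv.contains ([] : List Char) then true else pvScan words adv rest

def is_junk_alt (name : String) : Bool :=
  if PySem.Str.len name < 3 || 60 < PySem.Str.len name || 5 < PySem.Str.count name " " then true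
  else pvScan pvJunkWordsB [] (PySem.Str.lower name).toList

-- ===== PRECONDITION & SPEC =====
def Spec_is_junk (name : String) (out : Bool) : Prop := out = is_junk_alt name
instance (name : String) (out : Bool) : Decidable (Spec_is_junk name out) := by unfold Spec_is_junk; infer_instance

-- ===== CLAIM =====
def Claim_equal_is_junk : Prop := ∀ (name : String), Dom_is_junk name → Spec_is_junk name (is_junk name)

-- ===== LEMMAS AND PROOFS =====

-- A's early-return word loop is the boolean 'any substring' over the word list.
theorem pvAWordLoop_eq (lower : String) (ws : List String) :
    pvAWordLoop lower ws = ws.any (fun w => PySem.Str.isIn w lower) := by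
  induction ws with
  | nil => rfl
  | cons w ws ih =>
    rw [pvAWordLoop, ih, List.any_cons]
    split_ifs with hw <;> simp at hw <;> simp [hw]

-- a nonempty pattern is a substring of c::rest iff it starts at 0 or occurs in rest
theorem isIn_cons (w : List Char) (c : Char) (rest : List Char) :
    PySem.Chars.isIn w (c :: rest) = (w.isPrefixOf (c :: rest) || PySem.Chars.isIn w rest) := by
  rw [Bool.eq_iff_iff]
  simp only [Bool.or_eq_true, List.isPrefixOf_iff_prefix]
  rw [← PySem.Chars.exists_prefix_drop_iff_isIn, ← PySem.Chars.exists_prefix_drop_iff_isIn]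
  constructor
  · rintro ⟨j, hj⟩
    cases j with
    | zero => exact Or.inl (by simpa using hj)
    | succ j => exact Or.inr ⟨j, by simpa using hj⟩
  · rintro (h | ⟨j, hj⟩)
    · exact ⟨0, by simpa using h⟩
    · exact ⟨j + 1, by simpa using hj⟩

-- B's NFA scan computes "some active suffix is a prefix of l, or some word occurs in l"
theorem pvScan_eq (words : List (List Char)) (hw : ∀ w ∈ words, w ≠ []) :
    ∀ (l : List Char) (active : List (List Char)), (∀ s ∈ active, s ≠ []) →
      pvScan words active l
        = (active.any (fun s => s.isPrefixOf l) || words.any (fun w => PySem.Chars.isIn w l)) := by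
  intro l
  induction l with
  | nil =>
    intro active ha
    rw [pvScan, eq_comm]
    simp only [Bool.or_eq_false_iff, List.any_eq_false]
    constructor
    · intro s hs hp
      exact ha s hs (List.prefix_nil.mp (List.isPrefixOf_iff_prefix.mp hp))
    · intro w hwin hin
      exact hw w hwin (List.eq_nil_of_infix_nil ((PySem.Chars.isIn_iff_infix _ _).mp hin))
  | cons c rest ih =>
    intro active ha
    rw [pvScan]
    have hmem : ∀ s, s ∈ active ++ words → s ≠ [] := by
      intro s hs
      rcases List.mem_append.mp hs with h | h
      · exact ha s h
      · exact hw s h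
    -- characterise prefix-of (c::rest) for a nonempty pattern
    have hpref : ∀ s : List Char, s ≠ [] →
        (s.isPrefixOf (c :: rest)
          = ((s.head? == some c) && (s.drop 1).isPrefixOf rest)) := by
      intro s hs
      cases s with
      | nil => exact absurd rfl hs
      | cons a s' => simp [List.isPrefixOf]
    by_cases hnil : (pvAdvance c (active ++ words)).contains ([] : List Char)
    · rw [if_pos hnil]
      -- some s in active ++ words equals [c]; hence RHS is true
      obtain ⟨s, hsmem, hhead, hdrop⟩ : ∃ s ∈ active ++ words, s.head? = some c ∧ s.drop 1 = [] := by
        have := List.mem_of_elem_eq_true hnil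
        simp only [pvAdvance, List.mem_map, List.mem_filter] at this
        obtain ⟨s, ⟨hs1, hs2⟩, hs3⟩ := this
        exact ⟨s, hs1, by simpa using hs2, hs3⟩
      have hsc : s = [c] := by
        cases s with
        | nil => simp at hhead
        | cons a s' =>
          simp only [List.head?_cons, Option.some.injEq] at hhead
          simp only [List.drop_succ_cons, List.drop_zero] at hdrop
          rw [hhead, hdrop]
      rw [eq_comm, Bool.or_eq_true]
      rcases List.mem_append.mp hsmem with h | h
      · exact Or.inl (List.any_eq_true.mpr ⟨s, h, by simp [hsc, List.isPrefixOf]⟩)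
      · refine Or.inr (List.any_eq_true.mpr ⟨s, h, ?_⟩)
        rw [isIn_cons]
        simp [hsc, List.isPrefixOf]
    · rw [if_neg hnil]
      have hadv : ∀ s ∈ pvAdvance c (active ++ words), s ≠ [] := by
        intro s hs hcon
        exact hnil (List.elem_eq_true_of_mem (hcon ▸ hs))
      rw [ih _ hadv]
      rw [Bool.eq_iff_iff]
      simp only [Bool.or_eq_true, List.any_eq_true]
      have hadvmem : ∀ t : List Char, (t ∈ pvAdvance c (active ++ words))
          ↔ ∃ s ∈ active ++ words, s.head? = some c ∧ s.drop 1 = t := by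
        intro t
        simp only [pvAdvance, List.mem_map, List.mem_filter]
        constructor
        · rintro ⟨s, ⟨h1, h2⟩, h3⟩; exact ⟨s, h1, by simpa using h2, h3⟩
        · rintro ⟨s, h1, h2, h3⟩; exact ⟨s, ⟨h1, by simpa using h2⟩, h3⟩
      constructor
      · rintro (⟨t, ht, hp⟩ | ⟨w, hwin, hin⟩)
        · obtain ⟨s, hsmem, hhead, hdrop⟩ := (hadvmem t).mp ht
          have hsp : s.isPrefixOf (c :: rest) = true := by
            rw [hpref s (hmem s hsmem)]
            simp [hhead, hdrop, hp]
          rcases List.mem_append.mp hsmem with h | h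
          · exact Or.inl ⟨s, h, hsp⟩
          · exact Or.inr ⟨s, h, by rw [isIn_cons]; simp [hsp]⟩
        · exact Or.inr ⟨w, hwin, by rw [isIn_cons]; simp [hin]⟩
      · rintro (⟨s, hs, hp⟩ | ⟨w, hwin, hin⟩)
        · -- active suffix s is a prefix of c::rest
          rw [hpref s (ha s hs)] at hp
          simp only [Bool.and_eq_true, beq_iff_eq] at hp
          exact Or.inl ⟨s.drop 1, (hadvmem _).mpr ⟨s, List.mem_append_left _ hs, hp.1, rfl⟩, hp.2⟩
        · rw [isIn_cons, Bool.or_eq_true] at hin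
          rcases hin with hp | hin
          · rw [hpref w (hw w hwin)] at hp
            simp only [Bool.and_eq_true, beq_iff_eq] at hp
            exact Or.inl ⟨w.drop 1, (hadvmem _).mpr ⟨w, List.mem_append_right _ hwin, hp.1, rfl⟩, hp.2⟩
          · exact Or.inr ⟨w, hwin, hin⟩

theorem pvJunkWordsB_ne_nil : ∀ w ∈ pvJunkWordsB, w ≠ ([] : List Char) := by decide

theorem pvJunkWordsB_eq : pvJunkWordsB = pvJunkWordsA.map String.toList := rfl

-- ===== VERDICT =====
theorem is_junk_spec : Claim_equal_is_junk := by
  intro name _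
  unfold Spec_is_junk is_junk is_junk_alt
  simp only []
  rw [pvAWordLoop_eq, pvScan_eq pvJunkWordsB pvJunkWordsB_ne_nil _ [] (by simp), pvJunkWordsB_eq]
  have hbridge : ∀ w : String, PySem.Str.isIn w (PySem.Str.lower name)
      = PySem.Chars.isIn w.toList (PySem.Str.lower name).toList := by
    intro w; simp [PySem.Str.isIn_eq]
  simp only [hbridge, List.any_map, List.any_nil, Bool.false_or]
  split_ifs <;> simp_all <;> try omega
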